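-- pv_equiv track=rewrite | github.com/nmroulu/Spinguin | tests/core_tests/test_superoperators.py | _build_operator_strings
-- ===== SOURCE A (Python) =====
-- def _build_operator_strings(
--
--     labels,
-- ):
--     """
--     Generate three-spin operator strings for the given labels.
--     """
--
--     # Build all three-spin product-operator strings.
--     operator_strings = []
--     for label_i in labels:
--         operator_i = "E" if label_i == "E" else f"I({label_i}, 0)"
--         for label_j in labels:
--             operator_j = "E" if label_j == "E" else f"I({label_j}, 1)"
--             for label_k in labels:
--                 operator_k = "E" if label_k == "E" else f"I({label_k}, 2)"
--                 operator_strings.append(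
--                     f"{operator_i} * {operator_j} * {operator_k}"
--                 )
--
--     return operator_strings
-- ===== SOURCE B (Python) =====
-- def _build_operator_strings(
--     labels,
-- ):
--     """
--     Generate three-spin operator strings for the given labels.
--     """
--     # Build the product back-to-front: start with the position-2 operator
--     # strings as suffixes, then twice prepend one more operator column
--     # (positions 1 then 0), materialising partial-suffix lists of sizes
--     # n, n^2, n^3 instead of nesting three loops.
--     def op(label, pos):
--         return "E" if label == "E" else f"I({label}, {pos})"
--
--     strings = [op(label, 2) for label in labels]
--     for pos in (1, 0):
--         strings = [op(label, pos) + " * " + s for label in labels for s in strings]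
--     return strings
-- ===== Notes on version B (the rewrite author's own statement) =====
-- stated objective: alternative
-- what changed: B builds the triple product back-to-front by a fold over operator positions: it starts from the position-2 suffix strings and twice prepends one more operator column, materialising partial-suffix lists, instead of A's three nested loops formatting each full string at the innermost level.
import Mathlib
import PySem

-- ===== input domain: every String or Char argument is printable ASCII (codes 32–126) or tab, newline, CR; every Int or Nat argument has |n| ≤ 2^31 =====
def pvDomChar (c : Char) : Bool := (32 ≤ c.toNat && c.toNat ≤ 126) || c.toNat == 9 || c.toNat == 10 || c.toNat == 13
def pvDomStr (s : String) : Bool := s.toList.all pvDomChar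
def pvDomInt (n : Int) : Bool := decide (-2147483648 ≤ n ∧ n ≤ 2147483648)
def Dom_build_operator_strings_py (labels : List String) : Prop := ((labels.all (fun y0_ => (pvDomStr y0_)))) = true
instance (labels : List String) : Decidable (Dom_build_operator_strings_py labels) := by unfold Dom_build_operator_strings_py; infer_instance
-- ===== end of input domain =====

-- B builds the product back-to-front: a fold over operator positions prepending one column at a time to partial-suffix lists; same return value.


-- ===== PORT A =====
def build_operator_strings_py (labels : List String) : List String :=
  labels.foldl (fun acc label_i =>
    let operator_i := if label_i == "E" then "E" else "I(" ++ label_i ++ ", 0)"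
    labels.foldl (fun acc2 label_j =>
      let operator_j := if label_j == "E" then "E" else "I(" ++ label_j ++ ", 1)"
      labels.foldl (fun acc3 label_k =>
        let operator_k := if label_k == "E" then "E" else "I(" ++ label_k ++ ", 2)"
        acc3 ++ [operator_i ++ " * " ++ operator_j ++ " * " ++ operator_k]) acc2) acc) []

-- ===== PORT B =====
-- helper op(label, pos)
def pvOp (label pos : String) : String :=
  if label == "E" then "E" else "I(" ++ label ++ ", " ++ pos ++ ")"

def build_operator_strings_py_alt (labels : List String) : List String :=
  let strings := labels.map (fun label => pvOp label "2")
  ["1", "0"].foldl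
    (fun strings pos =>
      labels.flatMap (fun label => strings.map (fun s => pvOp label pos ++ " * " ++ s)))
    strings

-- ===== PRECONDITION & SPEC =====
def Spec_build_operator_strings_py (labels : List String) (out : List String) : Prop := out = build_operator_strings_py_alt labels
instance (labels : List String) (out : List String) : Decidable (Spec_build_operator_strings_py labels out) := by unfold Spec_build_operator_strings_py; infer_instance

-- ===== CLAIM (what is proved, stated in full; the proofs are below) =====
def Claim_equal_build_operator_strings_py : Prop := ∀ (labels : List String), Dom_build_operator_strings_py labels → Spec_build_operator_strings_py labels (build_operator_strings_py labels)

-- ===== LEMMAS AND PROOFS =====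
-- A's outer append-loop equals a flatMap over the operator strings
theorem outer_loop_eq (labels inner : List String) (acc : List String) :
    labels.foldl (fun acc label_i =>
      let operator_i := if label_i == "E" then "E" else "I(" ++ label_i ++ ", 0)"
      inner.foldl (fun acc2 label_j =>
        let operator_j := if label_j == "E" then "E" else "I(" ++ label_j ++ ", 1)"
        inner.foldl (fun acc3 label_k =>
          let operator_k := if label_k == "E" then "E" else "I(" ++ label_k ++ ", 2)"
          acc3 ++ [operator_i ++ " * " ++ operator_j ++ " * " ++ operator_k]) acc2) acc) acc
    = acc ++ labels.flatMap (fun label_i =>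
        inner.flatMap (fun label_j =>
          inner.map (fun label_k =>
            (if label_i == "E" then "E" else "I(" ++ label_i ++ ", 0)") ++ " * " ++
            (if label_j == "E" then "E" else "I(" ++ label_j ++ ", 1)") ++ " * " ++
            (if label_k == "E" then "E" else "I(" ++ label_k ++ ", 2)")))) := by
  simp only [PySem.List.foldl_append_eq_flatMap, ← List.map_eq_flatMap]

-- the A-side inline string equals B-side pvOp pieces, re-associated
theorem point_eq (li lj lk : String) :
    (if li == "E" then "E" else "I(" ++ li ++ ", 0)") ++ " * " ++
    (if lj == "E" then "E" else "I(" ++ lj ++ ", 1)") ++ " * " ++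
    (if lk == "E" then "E" else "I(" ++ lk ++ ", 2)")
    = pvOp li "0" ++ " * " ++ (pvOp lj "1" ++ " * " ++ pvOp lk "2") := by
  unfold pvOp
  by_cases h1 : li == "E" <;> by_cases h2 : lj == "E" <;> by_cases h3 : lk == "E" <;>
    simp [h1, h2, h3, String.append_assoc] <;> (rw [← String.append_assoc]; rfl)

-- ===== VERDICT (by name: the statement is the Claim_ definition above) =====
theorem build_operator_strings_py_spec : Claim_equal_build_operator_strings_py := by
  intro labels _
  unfold Spec_build_operator_strings_py build_operator_strings_py build_operator_strings_py_alt
  rw [outer_loop_eq]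
  simp only [List.nil_append, List.foldl_cons, List.foldl_nil,
    List.map_flatMap, List.map_map, Function.comp_def, point_eq]
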